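-- pv_equiv track=rewrite | github.com/nare-ua/DeepLearningExamples | PyTorch/SpeechSynthesis/Tacotron2/tacotron2/text/get_kor_amount_string.py | get_kor_amount_string
-- ===== SOURCE A (Python) =====
-- def get_kor_amount_string(num_amount, ndigits_round=0, str_suffix=''):
--     """숫자를 자릿수 한글단위와 함께 리턴한다 """
--     if isinstance(num_amount, str):
--       num_amount = int(num_amount)
--     assert isinstance(num_amount, int) and isinstance(ndigits_round, int)
--     if num_amount == 0: return '영'
--     assert num_amount >= 1, '최소 1원 이상 입력되어야 합니다'
--     ## 일, 십, 백, 천, 만, 십, 백, 천, 억, ... 단위 리스트를 만든다.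
--     maj_units = ['만', '억', '조', '경', '해', '자', '양', '구', '간', '정', '재', '극'] # 10000 단위
--     units     = [' '] # 시작은 일의자리로 공백으로하고 이후 십, 백, 천, 만...
--     for mm in maj_units:
--         units.extend(['십', '백', '천']) # 중간 십,백,천 단위
--         units.append(mm)
--
--     list_amount = list(str(round(num_amount, ndigits_round))) # 라운딩한 숫자를 리스트로 바꾼다
--     list_amount.reverse() # 일, 십 순서로 읽기 위해 순서를 뒤집는다
--
--     str_result = '' # 결과
--     num_len_list_amount = len(list_amount)
--
--     for i in range(num_len_list_amount):
--         str_num = list_amount[i]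
--         # 만, 억, 조 단위에 천, 백, 십, 일이 모두 0000 일때는 생략
--         if num_len_list_amount >= 9 and i >= 4 and i % 4 == 0 and ''.join(list_amount[i:i+4]) == '0000':
--             continue
--         if str_num == '0': # 0일 때
--             if i % 4 == 0: # 4번째자리일 때(만, 억, 조...)
--                 str_result = units[i] + str_result # 단위만 붙인다
--         elif str_num == '1': # 1일 때
--             if i % 4 == 0: # 4번째자리일 때(만, 억, 조...)
--                 str_result = str_num + units[i] + str_result # 숫자와 단위를 붙인다
--             else: # 나머지자리일 때
--                 str_result = units[i] + str_result # 단위만 붙인다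
--         else: # 2~9일 때
--             str_result = str_num + units[i] + str_result # 숫자와 단위를 붙인다
--     str_result = str_result.strip() # 문자열 앞뒤 공백을 제거한다
--     if len(str_result) == 0:
--         return None
--     if not str_result[0].isnumeric(): # 앞이 숫자가 아닌 문자인 경우
--         str_result = '1' + str_result # 1을 붙인다
--     return str_result + str_suffix # 접미사를 붙인다
-- ===== SOURCE B (Python) =====
-- def _split_groups(digits):
--     """Split a digit string into 4-char groups from the right, least significant group first."""
--     if len(digits) <= 4:
--         return [digits]
--     return [digits[-4:]] + _split_groups(digits[:-4])
--
--
-- def _render_group(grp, major_unit, is_ones_group):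
--     """Render one up-to-4-digit group (most significant digit first)."""
--     out = ''
--     minor_units = ['천', '백', '십']
--     for d, u in zip(grp, minor_units[4 - len(grp):]):
--         # positions carrying a minor unit: '1' keeps only the unit, '0' is silent
--         if d == '1':
--             out += u
--         elif d != '0':
--             out += d + u
--     d = grp[-1]
--     if is_ones_group:
--         return out + (d if d != '0' else '')
--     return out + (d + major_unit if d != '0' else major_unit)
--
--
-- def get_kor_amount_string(num_amount, ndigits_round=0, str_suffix=''):
--     """숫자를 자릿수 한글단위와 함께 리턴한다 """
--     if isinstance(num_amount, str):
--         num_amount = int(num_amount)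
--     assert isinstance(num_amount, int) and isinstance(ndigits_round, int)
--     if num_amount == 0:
--         return '영'
--     assert num_amount >= 1, '최소 1원 이상 입력되어야 합니다'
--     digits = str(round(num_amount, ndigits_round))
--     maj_units = ['', '만', '억', '조', '경', '해', '자', '양', '구', '간', '정', '재', '극']
--     big = len(digits) >= 9
--     parts = []
--     for idx, grp in enumerate(_split_groups(digits)):
--         if big and idx >= 1 and grp == '0000':
--             continue  # an all-zero middle group contributes nothing
--         parts.append(_render_group(grp, maj_units[idx], idx == 0))
--     result = ''.join(reversed(parts))
--     if not result:
--         return None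
--     if not result[0].isnumeric():
--         result = '1' + result
--     return result + str_suffix
-- ===== Notes on version B (the rewrite author's own statement) =====
-- stated objective: alternative
-- what changed: B splits the rounded digit string into 4-digit groups from the right and renders each group (minor units and its major unit) in one pass per group, instead of A's index-by-index scan over the reversed digit list against a precomputed 49-entry unit table.
import Mathlib
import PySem

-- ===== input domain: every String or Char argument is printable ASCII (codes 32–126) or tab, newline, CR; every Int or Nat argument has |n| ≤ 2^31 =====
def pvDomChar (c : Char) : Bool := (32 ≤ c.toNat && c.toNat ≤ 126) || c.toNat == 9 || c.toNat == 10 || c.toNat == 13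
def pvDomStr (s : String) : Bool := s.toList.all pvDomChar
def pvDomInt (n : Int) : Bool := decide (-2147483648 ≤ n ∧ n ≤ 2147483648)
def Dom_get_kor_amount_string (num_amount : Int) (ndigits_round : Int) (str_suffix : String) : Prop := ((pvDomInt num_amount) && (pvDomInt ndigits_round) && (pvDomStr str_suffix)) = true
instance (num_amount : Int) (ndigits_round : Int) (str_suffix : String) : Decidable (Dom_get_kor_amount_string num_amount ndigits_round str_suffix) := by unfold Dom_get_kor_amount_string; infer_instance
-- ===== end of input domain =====

-- B renders the number in 4-digit groups (만/억/조 blocks) instead of A's digit-by-digit reversed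
-- scan; same return value (equivalence is about the return value only; neither version mutates input).

-- ===== PORT A =====
-- shared preamble helper: Python's built-in round(int, ndigits) (banker's rounding to a power of ten).
-- Python computes 10 ** (-d) here; on the stated domain (|n| ≤ 2^31) any d ≤ -12 rounds to 0, so the
-- first branch only shortcuts an infeasibly large power — it is exact for |n| ≤ 2^31.
def pyRoundInt (n d : Int) : Int :=
  if 0 ≤ d then n
  else if d ≤ -12 then 0
  else
    let m : Int := 10 ^ (-d).toNat
    let q := PySem.Int.floordiv n m
    let r := PySem.Int.mod n m
    if 2 * r > m ∨ (2 * r = m ∧ PySem.Int.mod q 2 = 1) then (q + 1) * m else q * m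

-- shared preamble helper: str.isnumeric() restricted to the characters this program ever tests
-- (ASCII digits, which are numeric, and Hangul unit characters, which are not) — exact here.
def pyIsNumericChar (c : Char) : Bool := decide ('0' ≤ c ∧ c ≤ '9')

def majUnitsA : List (List Char) :=
  [['만'], ['억'], ['조'], ['경'], ['해'], ['자'], ['양'], ['구'], ['간'], ['정'], ['재'], ['극']]

-- units = [' ']; for mm in maj_units: units.extend(['십','백','천']); units.append(mm)
def unitsA : List (List Char) :=
  majUnitsA.foldl (fun u mm => u ++ [['십'], ['백'], ['천'], mm]) [[' ']]

def get_kor_amount_string (num_amount : Int) (ndigits_round : Int) (str_suffix : String) : Option String :=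
  -- (num_amount is an Int here, so the isinstance-str branch does nothing)
  if num_amount = 0 then some "영"
  else if num_amount < 1 then none  -- Python: assert num_amount >= 1 raises AssertionError (outside Pre_)
  else
    let listAmount : List Char := (PySem.Int.toChars (pyRoundInt num_amount ndigits_round)).reverse
    let numLen : Int := PySem.List.len listAmount
    let strResult : List Char :=
      (PySem.List.pyRange 0 numLen 1).foldl (fun acc i =>
        -- str_num = list_amount[i]  (0 ≤ i < len, so in range; default never read)
        let strNum : Char := PySem.List.pyGetD listAmount i ' '
        -- units[i]: i < len ≤ 12 < 49 on the stated domain, so in range; default never read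
        let unit : List Char := PySem.List.pyGetD unitsA i []
        if 9 ≤ numLen ∧ 4 ≤ i ∧ PySem.Int.mod i 4 = 0 ∧
            PySem.List.slice listAmount (some i) (some (i + 4)) = ['0', '0', '0', '0'] then
          acc  -- ''.join(list_amount[i:i+4]) == '0000' → continue
        else if strNum = '0' then (if PySem.Int.mod i 4 = 0 then unit ++ acc else acc)
        else if strNum = '1' then
          (if PySem.Int.mod i 4 = 0 then strNum :: (unit ++ acc) else unit ++ acc)
        else strNum :: (unit ++ acc)) []
    let stripped : List Char := PySem.Chars.strip strResult
    if stripped.length = 0 then none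
    else
      -- str_result[0]: nonempty here, so index 0 is in range; default never read
      let repaired : List Char :=
        if ¬ (pyIsNumericChar (stripped.getD 0 ' ') = true) then '1' :: stripped else stripped
      some (String.ofList (repaired ++ str_suffix.toList))

-- ===== PORT B =====
def majUnitsB : List (List Char) :=
  [[], ['만'], ['억'], ['조'], ['경'], ['해'], ['자'], ['양'], ['구'], ['간'], ['정'], ['재'], ['극']]

-- split a digit string into 4-char groups from the right, least significant group first
def splitGroups (digits : List Char) : List (List Char) :=
  if digits.length ≤ 4 then [digits]
  else PySem.List.slice digits (some (-4)) none :: splitGroups (PySem.List.slice digits none (some (-4)))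
termination_by digits.length
decreasing_by
  rw [PySem.List.slice_to_neg_ofNat digits 4 (by omega)]
  simp; omega

-- render one up-to-4-digit group (most significant digit first)
def renderGroupB (grp : List Char) (majorUnit : List Char) (isOnes : Bool) : List Char :=
  let minorUnits : List (List Char) := [['천'], ['백'], ['십']]
  -- zip(grp, minor_units[4 - len(grp):]) pairs all but the last digit with its minor unit
  let zipped := grp.zip (PySem.List.slice minorUnits (some (4 - PySem.List.len grp)) none)
  let out : List Char := zipped.foldl (fun out du =>
      if du.1 = '1' then out ++ du.2
      else if ¬ du.1 = '0' then out ++ (du.1 :: du.2)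
      else out) []
  let d : Char := PySem.List.pyGetD grp (-1) ' '  -- grp[-1]; groups are nonempty, so in range
  if isOnes then out ++ (if ¬ d = '0' then [d] else [])
  else out ++ (if ¬ d = '0' then d :: majorUnit else majorUnit)

def get_kor_amount_string_alt (num_amount : Int) (ndigits_round : Int) (str_suffix : String) : Option String :=
  if num_amount = 0 then some "영"
  else if num_amount < 1 then none  -- Python: assert num_amount >= 1 raises AssertionError (outside Pre_)
  else
    let digits : List Char := PySem.Int.toChars (pyRoundInt num_amount ndigits_round)
    let big : Bool := decide (9 ≤ PySem.List.len digits)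
    let parts : List (List Char) :=
      (PySem.List.enumerate (splitGroups digits)).foldl (fun ps p =>
        if big = true ∧ 1 ≤ p.1 ∧ p.2 = ['0', '0', '0', '0'] then ps  -- all-zero middle group: continue
        else
          -- maj_units[idx]: idx ≤ 2 on the stated domain, so in range; default never read
          ps ++ [renderGroupB p.2 (PySem.List.pyGetD majUnitsB p.1 []) (p.1 == 0)]) []
    let result : List Char := parts.reverse.flatten  -- ''.join(reversed(parts))
    if result = [] then none
    else
      let repaired : List Char :=
        if ¬ (pyIsNumericChar (result.getD 0 ' ') = true) then '1' :: result else result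
      some (String.ofList (repaired ++ str_suffix.toList))

-- ===== PRECONDITION & SPEC =====
-- Pre_ excludes exactly num_amount < 0, where Python A raises AssertionError ('최소 1원 이상').
def Pre_get_kor_amount_string (num_amount : Int) (ndigits_round : Int) (str_suffix : String) : Prop :=
  0 ≤ num_amount
instance (num_amount : Int) (ndigits_round : Int) (str_suffix : String) : Decidable (Pre_get_kor_amount_string num_amount ndigits_round str_suffix) := by unfold Pre_get_kor_amount_string; infer_instance

def pvWitness_get_kor_amount_string : Int × Int × String := (123456789, -2, "won")

def Spec_get_kor_amount_string (num_amount : Int) (ndigits_round : Int) (str_suffix : String) (out : Option String) : Prop := out = get_kor_amount_string_alt num_amount ndigits_round str_suffix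
instance (num_amount : Int) (ndigits_round : Int) (str_suffix : String) (out : Option String) : Decidable (Spec_get_kor_amount_string num_amount ndigits_round str_suffix out) := by unfold Spec_get_kor_amount_string; infer_instance

-- ===== CLAIM (what is proved, stated in full; the proofs are below) =====
def Claim_equal_get_kor_amount_string : Prop := ∀ (num_amount : Int) (ndigits_round : Int) (str_suffix : String), Dom_get_kor_amount_string num_amount ndigits_round str_suffix → Pre_get_kor_amount_string num_amount ndigits_round str_suffix → Spec_get_kor_amount_string num_amount ndigits_round str_suffix (get_kor_amount_string num_amount ndigits_round str_suffix)

-- ===== LEMMAS AND PROOFS =====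

def specA (big : Bool) : Nat → List Char → List Char
  | _, [] => []
  | i, d :: rest =>
    specA big (i + 1) rest ++
      (if big = true ∧ 4 ≤ i ∧ i % 4 = 0 ∧ d :: rest.take 3 = ['0', '0', '0', '0'] then []
       else if d = '0' then (if i % 4 = 0 then unitsA.getD i [] else [])
       else if d = '1' then (if i % 4 = 0 then d :: unitsA.getD i [] else unitsA.getD i [])
       else d :: unitsA.getD i [])

def chunks4 (xs : List Char) : List (List Char) :=
  if xs.length ≤ 4 then [xs.take 4] else xs.take 4 :: chunks4 (xs.drop 4)
termination_by xs.length
decreasing_by simp; omega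

def partsList (big : Bool) : Nat → List (List Char) → List (List Char)
  | _, [] => []
  | idx, g :: gs =>
    (if big = true ∧ 1 ≤ idx ∧ g = ['0', '0', '0', '0'] then []
     else [renderGroupB g (majUnitsB.getD idx []) (decide (idx = 0))]) ++ partsList big (idx + 1) gs

def goB (big : Bool) : Nat → List (List Char) → List Char
  | _, [] => []
  | idx, g :: gs =>
    goB big (idx + 1) gs ++
      (if big = true ∧ 1 ≤ idx ∧ g = ['0', '0', '0', '0'] then []
       else renderGroupB g (majUnitsB.getD idx []) (decide (idx = 0)))

theorem unitsA_at : ∀ idx : Nat, idx < 12 →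
    unitsA.getD (4 * idx + 1) [] = ['십'] ∧ unitsA.getD (4 * idx + 2) [] = ['백'] ∧
    unitsA.getD (4 * idx + 3) [] = ['천'] ∧ unitsA.getD 0 [] = [' '] ∧
    (1 ≤ idx → unitsA.getD (4 * idx) [] = majUnitsB.getD idx []) := by
  decide

theorem minorSlice3 : PySem.List.slice [['천'], ['백'], ['십']] (some 3) none = [] := by decide
theorem minorSlice2 : PySem.List.slice [['천'], ['백'], ['십']] (some 2) none = [['십']] := by decide
theorem minorSlice1 : PySem.List.slice [['천'], ['백'], ['십']] (some 1) none = [['백'], ['십']] := by decide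
theorem minorSlice0 : PySem.List.slice [['천'], ['백'], ['십']] (some 0) none = [['천'], ['백'], ['십']] := by decide

-- canonical per-digit pieces
def cMinor (d : Char) (u : List Char) : List Char := if d = '0' then [] else if d = '1' then u else d :: u
def cOnes (d : Char) (u : List Char) : List Char := if d = '0' then u else d :: u

theorem stepFold (out : List Char) (p : Char × List Char) :
    (if p.1 = '1' then out ++ p.2 else if ¬ p.1 = '0' then out ++ p.1 :: p.2 else out)
      = out ++ cMinor p.1 p.2 := by
  unfold cMinor; split_ifs <;> simp_all

theorem bOnesTrue (d : Char) :
    (if ¬ d = '0' then [d] else []) = cOnes d [] := by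
  unfold cOnes; split_ifs <;> simp_all

theorem bOnesFalse (d : Char) (u : List Char) :
    (if ¬ d = '0' then d :: u else u) = cOnes d u := by
  unfold cOnes; split_ifs <;> simp_all

theorem render1 (d0 : Char) (U : List Char) (o : Bool) :
    renderGroupB [d0] U o = if o then cOnes d0 [] else cOnes d0 U := by
  simp only [cMinor, cOnes];
  cases o <;>
    norm_num [renderGroupB, PySem.List.len, PySem.List.pyGetD, PySem.List.pyGet?,
      PySem.List.pyIdx?, minorSlice3, bOnesTrue, bOnesFalse] <;> (split_ifs <;> simp_all)

theorem render2 (d0 d1 : Char) (U : List Char) (o : Bool) :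
    renderGroupB [d1, d0] U o = cMinor d1 ['십'] ++ (if o then cOnes d0 [] else cOnes d0 U) := by
  simp only [cMinor, cOnes];
  cases o <;>
    norm_num [renderGroupB, PySem.List.len, PySem.List.pyGetD, PySem.List.pyGet?,
      PySem.List.pyIdx?, minorSlice2, stepFold, bOnesTrue, bOnesFalse] <;> (split_ifs <;> simp_all)

theorem render3 (d0 d1 d2 : Char) (U : List Char) (o : Bool) :
    renderGroupB [d2, d1, d0] U o
      = cMinor d2 ['백'] ++ cMinor d1 ['십'] ++ (if o then cOnes d0 [] else cOnes d0 U) := by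
  simp only [cMinor, cOnes];
  cases o <;>
    norm_num [renderGroupB, PySem.List.len, PySem.List.pyGetD, PySem.List.pyGet?,
      PySem.List.pyIdx?, minorSlice1, stepFold, bOnesTrue, bOnesFalse, List.append_assoc] <;> (split_ifs <;> simp_all)

theorem render4 (d0 d1 d2 d3 : Char) (U : List Char) (o : Bool) :
    renderGroupB [d3, d2, d1, d0] U o
      = cMinor d3 ['천'] ++ cMinor d2 ['백'] ++ cMinor d1 ['십']
          ++ (if o then cOnes d0 [] else cOnes d0 U) := by
  simp only [cMinor, cOnes];
  cases o <;>
    norm_num [renderGroupB, PySem.List.len, PySem.List.pyGetD, PySem.List.pyGet?,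
      PySem.List.pyIdx?, minorSlice0, stepFold, bOnesTrue, bOnesFalse, List.append_assoc] <;> (split_ifs <;> simp_all)

theorem revzero (d0 d1 d2 d3 : Char) :
    ([d3, d2, d1, d0] = ['0', '0', '0', '0']) ↔ ([d0, d1, d2, d3] = ['0', '0', '0', '0']) := by
  simp only [List.cons.injEq, and_true]
  constructor <;> rintro ⟨h1, h2, h3, h4⟩ <;> exact ⟨h4, h3, h2, h1⟩

set_option maxHeartbeats 1000000 in
theorem specA_goB (big : Bool) :
    ∀ (rds : List Char), rds ≠ [] → ∀ idx : Nat, 4 * idx + rds.length ≤ 48 →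
      specA big (4 * idx) rds
        = goB big idx ((chunks4 rds).map List.reverse) ++ (if idx = 0 then [' '] else []) := by
  intro rds
  fun_induction chunks4 rds with
  | case1 rds hle =>
    intro hne idx hb
    have hidx : idx < 12 := by
      have : 1 ≤ rds.length := List.length_pos_iff.mpr hne
      omega
    obtain ⟨hu1, hu2, hu3, hu00, hu0⟩ := unitsA_at idx hidx
    have hm0 : 4 * idx % 4 = 0 := by omega
    have hm1 : ¬ (4 * idx + 1) % 4 = 0 := by omega
    have hm2 : ¬ (4 * idx + 1 + 1) % 4 = 0 := by omega
    have hm3 : ¬ (4 * idx + 1 + 1 + 1) % 4 = 0 := by omega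
    rcases rds with _ | ⟨d0, _ | ⟨d1, _ | ⟨d2, _ | ⟨d3, rest⟩⟩⟩⟩
    · exact absurd rfl hne
    -- length 1
    · have hs1 : ([d0] = ['0', '0', '0', '0']) = False := by simp
      simp only [List.take_succ_cons, List.take_nil, List.map_cons, List.map_nil,
        List.reverse_cons, List.reverse_nil, List.nil_append, List.singleton_append,
        List.cons_append, List.append_nil, goB, specA, hm0, hm1, hm2, hm3,
        eq_self_iff_true, true_and, and_true, false_and, and_false, if_true, if_false,
        ite_true, ite_false, ite_self]
      simp only [hs1, false_and, and_false, if_false]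
      rw [render1]
      rcases Nat.eq_zero_or_pos idx with h0 | hpos
      · subst h0
        norm_num at hu00 ⊢
        rw [hu00]
        simp only [cOnes]
        split_ifs <;> simp
      · have hne0 : ¬ idx = 0 := by omega
        rw [hu0 hpos]
        simp [hne0, cOnes]
    -- length 2
    · have hs1 : ([d0, d1] = ['0', '0', '0', '0']) = False := by simp
      have hs2 : ([d1] = ['0', '0', '0', '0']) = False := by simp
      have hs1r : ([d1, d0] = ['0', '0', '0', '0']) = False := by simp
      simp only [List.take_succ_cons, List.take_nil, List.map_cons, List.map_nil,
        List.reverse_cons, List.reverse_nil, List.nil_append, List.singleton_append,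
        List.cons_append, List.append_nil, goB, specA, hm0, hm1, hm2, hm3,
        eq_self_iff_true, true_and, and_true, false_and, and_false, if_true, if_false,
        ite_true, ite_false, ite_self]
      simp only [hs1, hs2, hs1r, false_and, and_false, if_false]
      rw [render2, hu1]
      rcases Nat.eq_zero_or_pos idx with h0 | hpos
      · subst h0
        norm_num at hu00 ⊢
        rw [hu00]
        simp only [cOnes, cMinor, List.append_assoc]
        split_ifs <;> simp
      · have hne0 : ¬ idx = 0 := by omega
        rw [hu0 hpos]
        simp only [hne0, cOnes, cMinor, List.append_assoc, if_false, decide_eq_true_eq]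
        split_ifs <;> simp
    -- length 3
    · have hs1 : ([d0, d1, d2] = ['0', '0', '0', '0']) = False := by simp
      have hs2 : ([d1, d2] = ['0', '0', '0', '0']) = False := by simp
      have hs3 : ([d2] = ['0', '0', '0', '0']) = False := by simp
      have hs2r : ([d2, d1, d0] = ['0', '0', '0', '0']) = False := by simp
      simp only [List.take_succ_cons, List.take_nil, List.map_cons, List.map_nil,
        List.reverse_cons, List.reverse_nil, List.nil_append, List.singleton_append,
        List.cons_append, List.append_nil, goB, specA, hm0, hm1, hm2, hm3,
        eq_self_iff_true, true_and, and_true, false_and, and_false, if_true, if_false,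
        ite_true, ite_false, ite_self]
      simp only [hs1, hs2, hs3, hs2r, false_and, and_false, if_false]
      rw [render3, hu1, hu2]
      rcases Nat.eq_zero_or_pos idx with h0 | hpos
      · subst h0
        norm_num at hu00 ⊢
        rw [hu00]
        simp only [cOnes, cMinor, List.append_assoc]
        split_ifs <;> simp
      · have hne0 : ¬ idx = 0 := by omega
        rw [hu0 hpos]
        simp only [hne0, cOnes, cMinor, List.append_assoc, if_false, decide_eq_true_eq]
        split_ifs <;> simp
    -- length 4
    · have hrest : rest = [] := by
        simp only [List.length_cons] at hle
        exact List.eq_nil_of_length_eq_zero (by omega)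
      subst hrest
      have hs2 : ([d1, d2, d3] = ['0', '0', '0', '0']) = False := by simp
      have hs3 : ([d2, d3] = ['0', '0', '0', '0']) = False := by simp
      have hs4 : ([d3] = ['0', '0', '0', '0']) = False := by simp
      have h41 : (4 ≤ 4 * idx) = (1 ≤ idx) := propext (by omega)
      have hrev : ([d0, d1, d2, d3] = ['0', '0', '0', '0'])
          = ([d3, d2, d1, d0] = ['0', '0', '0', '0']) := propext (revzero d0 d1 d2 d3).symm
      simp only [List.take_succ_cons, List.take_nil, List.map_cons, List.map_nil,
        List.reverse_cons, List.reverse_nil, List.nil_append, List.singleton_append,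
        List.cons_append, List.append_nil, goB, specA, hm0, hm1, hm2, hm3,
        eq_self_iff_true, true_and, and_true, false_and, and_false, if_true, if_false,
        ite_true, ite_false, ite_self]
      simp only [hs2, hs3, hs4, false_and, and_false, if_false, h41, hrev]
      rw [render4, hu1, hu2, hu3]
      rcases Nat.eq_zero_or_pos idx with h0 | hpos
      · subst h0
        norm_num at hu00 ⊢
        rw [hu00]
        simp only [cOnes, cMinor, List.append_assoc]
        split_ifs <;> simp_all
      · have hne0 : ¬ idx = 0 := by omega
        rw [hu0 hpos]
        simp only [hne0, cOnes, cMinor, List.append_assoc, if_false, decide_eq_true_eq]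
        split_ifs <;> simp_all
  | case2 rds hgt ih =>
    intro hne idx hb
    have hidx : idx < 12 := by omega
    obtain ⟨hu1, hu2, hu3, hu00, hu0⟩ := unitsA_at idx hidx
    have hm0 : 4 * idx % 4 = 0 := by omega
    have hm1 : ¬ (4 * idx + 1) % 4 = 0 := by omega
    have hm2 : ¬ (4 * idx + 1 + 1) % 4 = 0 := by omega
    have hm3 : ¬ (4 * idx + 1 + 1 + 1) % 4 = 0 := by omega
    rcases rds with _ | ⟨d0, _ | ⟨d1, _ | ⟨d2, _ | ⟨d3, rest⟩⟩⟩⟩ <;>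
        simp only [List.length_cons, List.length_nil] at hgt hb <;> try omega
    have hrne : rest ≠ [] := by
      intro h; subst h; simp at hgt
    have hih := ih hrne (idx + 1) (by simp only [List.drop_succ_cons, List.drop_zero]; omega)
    have hstep : 4 * idx + 1 + 1 + 1 + 1 = 4 * (idx + 1) := by omega
    simp only [List.drop_succ_cons, List.drop_zero] at hih
    have h41 : (4 ≤ 4 * idx) = (1 ≤ idx) := propext (by omega)
    have hrev : ([d0, d1, d2, d3] = ['0', '0', '0', '0'])
        = ([d3, d2, d1, d0] = ['0', '0', '0', '0']) := propext (revzero d0 d1 d2 d3).symm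
    have htk : (d1 :: d2 :: d3 :: rest).take 3 = [d1, d2, d3] := by
      rcases rest with _ | ⟨x, xs⟩ <;> simp
    simp only [List.take_succ_cons, List.take_nil, List.drop_succ_cons, List.drop_zero,
        List.map_cons, List.reverse_cons, List.reverse_nil, List.nil_append, List.take_zero,
        List.singleton_append, List.cons_append, List.append_nil, goB, specA, hstep, hih,
        hm0, hm1, hm2, hm3, eq_self_iff_true, true_and, and_true, false_and, and_false,
        if_true, if_false, ite_true, ite_false, ite_self]
    simp only [htk, h41, hrev, show (idx + 1 = 0) = False from by simp, if_false,
      List.append_nil]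
    clear ih hih hgt hne hb htk hrev
    rw [render4, hu1, hu2, hu3]
    rcases Nat.eq_zero_or_pos idx with h0 | hpos
    · subst h0
      norm_num at hu00 ⊢
      rw [hu00]
      simp only [cOnes, cMinor, List.append_assoc]
      congr 1
      split_ifs <;> simp_all
    · have hne0 : ¬ idx = 0 := by omega
      rw [hu0 hpos]
      simp only [hne0, cOnes, cMinor, List.append_assoc, if_false, decide_eq_true_eq]
      congr 1
      split_ifs <;> simp_all

theorem pyRoundInt_bounds (n d : Int) (h1 : 1 ≤ n) (hn : n ≤ 2147483648) :
    0 ≤ pyRoundInt n d ∧ pyRoundInt n d < 10 ^ 12 := by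
  unfold pyRoundInt
  by_cases hd : 0 ≤ d
  · rw [if_pos hd]; constructor <;> omega
  · rw [if_neg hd]
    by_cases hc : d ≤ -12
    · rw [if_pos hc]; norm_num
    · rw [if_neg hc]
      dsimp only
      have hdp : 1 ≤ (-d).toNat ∧ (-d).toNat ≤ 11 := by omega
      have hm1 : (10:Int) ^ (-d).toNat ≤ 10 ^ 11 := by
        apply pow_le_pow_right₀ (by norm_num) hdp.2
      have hmp : (0:Int) < 10 ^ (-d).toNat := by positivity
      rw [PySem.Int.floordiv_eq_ediv_of_pos hmp]
      have hq0 : 0 ≤ n / 10 ^ (-d).toNat := Int.ediv_nonneg (by omega) (by omega)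
      have hqm : n / 10 ^ (-d).toNat * 10 ^ (-d).toNat ≤ n := Int.ediv_mul_le n (by omega)
      have hub : (n / 10 ^ (-d).toNat + 1) * 10 ^ (-d).toNat ≤ n + 10 ^ (-d).toNat := by
        rw [add_mul]; omega
      have hq0m : 0 ≤ n / 10 ^ (-d).toNat * 10 ^ (-d).toNat := by positivity
      split_ifs
      · constructor
        · positivity
        · omega
      · constructor
        · exact hq0m
        · omega

theorem toDigitsCore_len_ge (b : Nat) : ∀ (f n : Nat) (acc : List Char),
    acc.length ≤ (Nat.toDigitsCore b f n acc).length := by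
  intro f
  induction f with
  | zero => intro n acc; simp [Nat.toDigitsCore]
  | succ f ih =>
    intro n acc
    simp only [Nat.toDigitsCore]
    split
    · simp
    · exact le_trans (by simp) (ih (n / b) _)

theorem toDigits_ne_nil (b n : Nat) : Nat.toDigits b n ≠ [] := by
  unfold Nat.toDigits
  simp only [Nat.toDigitsCore]
  split
  · simp
  · intro h
    have := toDigitsCore_len_ge b n (n / b) [(n % b).digitChar]
    rw [h] at this
    simp at this

theorem toDigitsCore_chars (b : Nat) : ∀ (f n : Nat) (acc : List Char),
    ∀ c ∈ Nat.toDigitsCore b f n acc, c ∈ acc ∨ ∃ k, c = Nat.digitChar k := by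
  intro f
  induction f with
  | zero => intro n acc c hc; exact Or.inl hc
  | succ f ih =>
    intro n acc c hc
    simp only [Nat.toDigitsCore] at hc
    revert hc
    split
    · intro hc
      rcases List.mem_cons.mp hc with h | h
      · exact Or.inr ⟨n % b, h⟩
      · exact Or.inl h
    · intro hc
      rcases ih (n / b) _ c hc with h | h
      · rcases List.mem_cons.mp h with h2 | h2
        · exact Or.inr ⟨n % b, h2⟩
        · exact Or.inl h2
      · exact Or.inr h

theorem digitChar_not_space (k : Nat) : PySem.Chars.isspace (Nat.digitChar k) = false := by
  by_cases h16 : k < 16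
  · interval_cases k <;> decide
  · have hstar : Nat.digitChar k = '*' := by
      unfold Nat.digitChar
      rw [if_neg (by omega), if_neg (by omega), if_neg (by omega), if_neg (by omega),
        if_neg (by omega), if_neg (by omega), if_neg (by omega), if_neg (by omega),
        if_neg (by omega), if_neg (by omega), if_neg (by omega), if_neg (by omega),
        if_neg (by omega), if_neg (by omega), if_neg (by omega), if_neg (by omega)]
    rw [hstar]; decide

theorem toDigits_not_space (b n : Nat) : ∀ c ∈ Nat.toDigits b n, PySem.Chars.isspace c = false := by
  intro c hc
  rcases toDigitsCore_chars b (n + 1) n [] c hc with h | ⟨k, hk⟩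
  · simp at h
  · rw [hk]; exact digitChar_not_space k

theorem strip_append_space (x : List Char) (hx : ∀ c ∈ x, PySem.Chars.isspace c = false) :
    PySem.Chars.strip (x ++ [' ']) = x := by
  rcases x with _ | ⟨c, t⟩
  · decide
  · have hc := hx c (by simp)
    unfold PySem.Chars.strip PySem.Chars.lstrip PySem.Chars.rstrip
    rw [List.cons_append, List.dropWhile_cons_of_neg (by simp [hc])]
    rw [show (c :: (t ++ [' '])).reverse = ' ' :: (t.reverse ++ [c]) by simp]
    rw [List.dropWhile_cons_of_pos (by decide)]
    have hself : List.dropWhile PySem.Chars.isspace (t.reverse ++ [c]) = t.reverse ++ [c] := by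
      apply List.dropWhile_eq_self_iff.mpr
      intro hl
      have hmem : (t.reverse ++ [c])[0] ∈ c :: t := by
        have := List.getElem_mem (l := t.reverse ++ [c]) (n := 0) hl
        rcases List.mem_append.mp this with h | h
        · exact List.mem_cons_of_mem _ (List.mem_reverse.mp h)
        · simp at h; simp [h]
      simp [hx _ hmem]
    rw [hself]
    simp

theorem foldl_chars (P : Char → Prop) : ∀ (zs : List (Char × List Char)) (out : List Char),
    (∀ c ∈ out, P c) → (∀ p ∈ zs, P p.1 ∧ ∀ c ∈ p.2, P c) →
    ∀ c ∈ zs.foldl (fun out du =>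
        if du.1 = '1' then out ++ du.2
        else if ¬ du.1 = '0' then out ++ (du.1 :: du.2) else out) out, P c := by
  intro zs
  induction zs with
  | nil => intro out hout _ c hc; exact hout c hc
  | cons p ps ih =>
    intro out hout hz c hc
    refine ih _ ?_ (fun q hq => hz q (by simp [hq])) c hc
    intro a ha
    obtain ⟨hp1, hp2⟩ := hz p (by simp)
    change a ∈ (if p.1 = '1' then out ++ p.2 else if ¬ p.1 = '0' then out ++ (p.1 :: p.2) else out) at ha
    have hor : a ∈ out ∨ a = p.1 ∨ a ∈ p.2 := by
      split_ifs at ha <;> (try simp at ha) <;> tauto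
    rcases hor with h | h | h
    · exact hout a h
    · rw [h]; exact hp1
    · exact hp2 a h

theorem renderGroupB_chars (g mu : List Char) (o : Bool) (P : Char → Prop)
    (hg : ∀ c ∈ g, P c) (hmu : ∀ c ∈ mu, P c) (hg0 : g ≠ [])
    (hk : P '천' ∧ P '백' ∧ P '십') :
    ∀ c ∈ renderGroupB g mu o, P c := by
  simp only [renderGroupB]
  intro c hc
  have hfold : ∀ c ∈ (g.zip (PySem.List.slice [['천'], ['백'], ['십']]
      (some (4 - PySem.List.len g)) none)).foldl (fun out du =>
        if du.1 = '1' then out ++ du.2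
        else if ¬ du.1 = '0' then out ++ (du.1 :: du.2) else out) [], P c := by
    apply foldl_chars P _ [] (by simp)
    intro p hp
    rcases p with ⟨a, u⟩
    obtain ⟨ha, hu⟩ := List.of_mem_zip hp
    refine ⟨hg a ha, fun x hx => ?_⟩
    have hin := PySem.List.mem_of_mem_slice _ _ _ hu
    simp only [List.mem_cons, List.mem_singleton, List.not_mem_nil, or_false] at hin
    rcases hin with h | h | h
    · rw [h] at hx; simp at hx; rw [hx]; exact hk.1
    · rw [h] at hx; simp at hx; rw [hx]; exact hk.2.1
    · rw [h] at hx; simp at hx; rw [hx]; exact hk.2.2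
  have hd : P (PySem.List.pyGetD g (-1) ' ') := by
    rw [PySem.List.pyGetD_neg_one g ' ' hg0]
    exact hg _ (List.getLast_mem hg0)
  revert hc
  split_ifs <;> intro hc <;> rcases List.mem_append.mp hc with h | h <;>
    first
      | exact hfold c h
      | exact hmu c h
      | (rcases List.mem_cons.mp h with h2 | h2
         · rw [h2]; exact hd
         · first
             | simp at h2
             | exact hmu c h2)
      | simp at h

theorem majUnitsB_not_space : ∀ idx : Nat, ∀ c ∈ majUnitsB.getD idx [],
    PySem.Chars.isspace c = false := by
  intro idx
  by_cases h : idx < 13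
  · interval_cases idx <;> intro c hc <;> simp [majUnitsB] at hc <;> (subst hc; rfl)
  · rw [List.getD_eq_default _ _ (by simp [majUnitsB]; omega)]
    simp

theorem goB_chars (big : Bool) (P : Char → Prop) (hk : P '천' ∧ P '백' ∧ P '십')
    (hmaj : ∀ idx : Nat, ∀ c ∈ majUnitsB.getD idx [], P c) :
    ∀ (gs : List (List Char)) (idx : Nat), (∀ g ∈ gs, (∀ c ∈ g, P c) ∧ g ≠ []) →
    ∀ c ∈ goB big idx gs, P c := by
  intro gs
  induction gs with
  | nil => intro idx _ c hc; simp [goB] at hc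
  | cons g gs ih =>
    intro idx hg c hc
    simp only [goB] at hc
    rcases List.mem_append.mp hc with h | h
    · exact ih (idx + 1) (fun q hq => hg q (by simp [hq])) c h
    · revert h; split_ifs <;> intro h
      · simp at h
      · obtain ⟨h1, h2⟩ := hg g (by simp)
        exact renderGroupB_chars g _ _ P h1 (hmaj idx) h2 hk c h

theorem chunks4_mem (xs : List Char) : ∀ g ∈ chunks4 xs, (∀ c ∈ g, c ∈ xs) ∧ (xs ≠ [] → g ≠ []) := by
  fun_induction chunks4 xs with
  | case1 xs h =>
    intro g hg
    simp only [List.mem_singleton] at hg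
    subst hg
    refine ⟨fun c hc => List.mem_of_mem_take hc, fun hx => ?_⟩
    simp [List.take_eq_nil_iff, hx]
  | case2 xs h ih =>
    intro g hg
    rcases List.mem_cons.mp hg with h1 | h1
    · subst h1
      refine ⟨fun c hc => List.mem_of_mem_take hc, fun hx => ?_⟩
      simp [List.take_eq_nil_iff, hx]
    · obtain ⟨ha, hb⟩ := ih g h1
      refine ⟨fun c hc => List.mem_of_mem_drop (ha c hc), fun _ => hb ?_⟩
      intro hd
      have := congrArg List.length hd
      simp at this
      omega
theorem splitGroups_eq (ds : List Char) :
    splitGroups ds = (chunks4 ds.reverse).map List.reverse := by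
  fun_induction splitGroups ds with
  | case1 ds h =>
    rw [chunks4]
    simp only [List.length_reverse, if_pos h, List.map_cons, List.map_nil]
    rw [List.take_of_length_le (by simpa using h), List.reverse_reverse]
  | case2 ds h ih =>
    rw [chunks4]
    simp only [List.length_reverse, if_neg h, List.map_cons]
    rw [PySem.List.slice_from_neg_ofNat ds 4 (by omega), PySem.List.slice_to_neg_ofNat ds 4 (by omega)] at *
    rw [List.take_reverse, List.reverse_reverse, ih]
    congr 2
    rw [List.drop_reverse]

theorem foldl_enumerate_partsList (big : Bool) :
    ∀ (gs : List (List Char)) (i : Nat) (acc : List (List Char)),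
      (PySem.List.enumerate gs (i : Int)).foldl (fun ps p =>
        if big = true ∧ 1 ≤ p.1 ∧ p.2 = ['0', '0', '0', '0'] then ps
        else ps ++ [renderGroupB p.2 (PySem.List.pyGetD majUnitsB p.1 []) (p.1 == 0)]) acc
      = acc ++ partsList big i gs := by
  intro gs
  induction gs with
  | nil => intro i acc; simp [PySem.List.enumerate, partsList]
  | cons g gs ih =>
    intro i acc
    rw [PySem.List.enumerate_cons]
    have hcast : ((i : Int) + 1) = ((i + 1 : Nat) : Int) := by push_cast; ring
    simp only [List.foldl_cons, hcast, ih, partsList]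
    have h1 : (1 ≤ (i : Int)) ↔ (1 ≤ i) := by omega
    have h0 : (((i : Int)) == (0 : Int)) = decide (i = 0) := by
      rcases i with _ | i <;> simp <;> omega
    rw [PySem.List.pyGetD_natCast]
    by_cases hs : big = true ∧ 1 ≤ i ∧ g = ['0', '0', '0', '0']
    · rw [if_pos (by rw [h1]; exact hs), if_pos hs]
      simp
    · rw [if_neg (by rw [h1]; exact hs), if_neg hs, h0]
      simp

theorem partsList_flatten (big : Bool) :
    ∀ (gs : List (List Char)) (idx : Nat),
      (partsList big idx gs).reverse.flatten = goB big idx gs := by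
  intro gs
  induction gs with
  | nil => intro idx; simp [partsList, goB]
  | cons g gs ih =>
    intro idx
    simp only [partsList, goB, List.reverse_append, List.flatten_append, ih]
    split <;> simp

theorem foldl_range_specA (rds : List Char) :
    ∀ (tail : List Char) (k : Nat) (acc : List Char), rds.drop k = tail → k ≤ rds.length →
      (PySem.List.pyRange (k : Int) (rds.length : Int) 1).foldl (fun acc i =>
        let strNum : Char := PySem.List.pyGetD rds i ' '
        let unit : List Char := PySem.List.pyGetD unitsA i []
        if 9 ≤ (rds.length : Int) ∧ 4 ≤ i ∧ PySem.Int.mod i 4 = 0 ∧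
            PySem.List.slice rds (some i) (some (i + 4)) = ['0', '0', '0', '0'] then acc
        else if strNum = '0' then (if PySem.Int.mod i 4 = 0 then unit ++ acc else acc)
        else if strNum = '1' then
          (if PySem.Int.mod i 4 = 0 then strNum :: (unit ++ acc) else unit ++ acc)
        else strNum :: (unit ++ acc)) acc
      = specA (decide (9 ≤ rds.length)) k tail ++ acc := by
  intro tail
  induction tail with
  | nil =>
    intro k acc hdrop hk
    have hlen : rds.length ≤ k := List.drop_eq_nil_iff.mp hdrop
    have hnil : PySem.List.pyRange (k : Int) (rds.length : Int) 1 = [] := by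
      simp [PySem.List.pyRange]; omega
    rw [hnil]; simp [specA]
  | cons d rest ih =>
    intro k acc hdrop hk
    have hld := congrArg List.length hdrop
    simp only [List.length_drop, List.length_cons] at hld
    have hlt : k < rds.length := by omega
    have hdrop1 : rds.drop (k + 1) = rest := by
      have := congrArg List.tail hdrop
      simpa [List.tail_drop] using this
    have hget : rds[k]? = some d := by
      have h0 : (rds.drop k)[0]? = some d := by rw [hdrop]; rfl
      rw [List.getElem?_drop] at h0; simpa using h0
    have hd : rds.getD k ' ' = d := by simp [List.getD_eq_getElem?_getD, hget]
    have hsl : PySem.List.slice rds (some (k : Int)) (some ((k : Int) + 4)) = d :: rest.take 3 := by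
      have h4 : ((k : Int) + 4) = (k : Int) + ((4 : Nat) : Int) := by norm_num
      rw [h4, PySem.List.slice_natCast_add, hdrop]
      simp
    have hmod : PySem.Int.mod (k : Int) 4 = ((k % 4 : Nat) : Int) := by
      exact_mod_cast PySem.Int.mod_natCast k 4
    rw [PySem.List.pyRange_one_cons (by exact_mod_cast hlt), List.foldl_cons]
    have hk1 : ((k : Int) + 1) = ((k + 1 : Nat) : Int) := by push_cast; ring
    rw [hk1, ih (k + 1) _ hdrop1 (by omega)]
    simp only [specA, List.append_assoc]
    congr 1
    simp only [PySem.List.pyGetD_natCast, hd, hsl, hmod, decide_eq_true_eq]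
    have hc1 : ((9 : Int) ≤ (rds.length : Int)) ↔ 9 ≤ rds.length := by omega
    have hc2 : ((4 : Int) ≤ (k : Int)) ↔ 4 ≤ k := by omega
    have hc3 : (((k % 4 : Nat) : Int) = 0) ↔ k % 4 = 0 := by omega
    simp only [hc1, hc2, hc3]
    split_ifs <;> simp


theorem assembly (n d : Int) (suf : String)
    (hdom : Dom_get_kor_amount_string n d suf) (hpre : 0 ≤ n) :
    get_kor_amount_string n d suf = get_kor_amount_string_alt n d suf := by
  unfold get_kor_amount_string get_kor_amount_string_alt
  by_cases h0 : n = 0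
  · simp [h0]
  · rw [if_neg h0, if_neg h0]
    have h1 : ¬ n < 1 := by omega
    rw [if_neg h1, if_neg h1]
    have hn : n ≤ 2147483648 := by
      unfold Dom_get_kor_amount_string pvDomInt at hdom
      simp only [Bool.and_eq_true, decide_eq_true_eq] at hdom
      omega
    obtain ⟨hv0, hvlt⟩ := pyRoundInt_bounds n d (by omega) hn
    have htc : PySem.Int.toChars (pyRoundInt n d) = Nat.toDigits 10 (pyRoundInt n d).toNat := by
      unfold PySem.Int.toChars
      rw [if_neg (by omega)]
    have hne : PySem.Int.toChars (pyRoundInt n d) ≠ [] := by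
      rw [htc]; exact toDigits_ne_nil 10 _
    have hlen : (PySem.Int.toChars (pyRoundInt n d)).length ≤ 12 := by
      rw [htc]
      apply Nat.toDigits_length 10 _ 12 (by norm_num)
      omega
    have hnospace : ∀ c ∈ PySem.Int.toChars (pyRoundInt n d), PySem.Chars.isspace c = false := by
      rw [htc]; exact toDigits_not_space 10 _
    -- A side
    have hA := foldl_range_specA (PySem.Int.toChars (pyRoundInt n d)).reverse
      (PySem.Int.toChars (pyRoundInt n d)).reverse 0 [] (by simp) (by simp)
    have hbig : decide (9 ≤ PySem.List.len (PySem.Int.toChars (pyRoundInt n d)))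
        = decide (9 ≤ (PySem.Int.toChars (pyRoundInt n d)).length) :=
      decide_eq_decide.mpr (by rw [PySem.List.len_eq]; omega)
    simp only [hbig]
    simp only [Nat.cast_zero, List.append_nil, List.length_reverse] at hA
    simp only [PySem.List.len_eq, List.length_reverse]
    rw [hA]
    -- B side
    rw [splitGroups_eq]
    have hB := foldl_enumerate_partsList
      (decide (9 ≤ (PySem.Int.toChars (pyRoundInt n d)).length))
      ((chunks4 (PySem.Int.toChars (pyRoundInt n d)).reverse).map List.reverse) 0 []
    simp only [Nat.cast_zero, List.nil_append] at hB
    rw [hB, partsList_flatten]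
    -- connect the two cores
    have hC := specA_goB (decide (9 ≤ (PySem.Int.toChars (pyRoundInt n d)).length))
      (PySem.Int.toChars (pyRoundInt n d)).reverse (by simpa using hne) 0
      (by simpa using by omega)
    norm_num at hC
    rw [hC]
    -- the B core contains no whitespace
    have hgs : ∀ g ∈ (chunks4 (PySem.Int.toChars (pyRoundInt n d)).reverse).map List.reverse,
        (∀ c ∈ g, PySem.Chars.isspace c = false) ∧ g ≠ [] := by
      intro g hg
      obtain ⟨h, hh, rfl⟩ := List.mem_map.mp hg
      obtain ⟨hcs, hnn⟩ := chunks4_mem (PySem.Int.toChars (pyRoundInt n d)).reverse h hh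
      constructor
      · intro c hcc
        exact hnospace c (List.mem_reverse.mp (hcs c (List.mem_reverse.mp hcc)))
      · simpa using hnn (by simpa using hne)
    have hBs := goB_chars (decide (9 ≤ (PySem.Int.toChars (pyRoundInt n d)).length))
      (fun c => PySem.Chars.isspace c = false) ⟨rfl, rfl, rfl⟩ majUnitsB_not_space
      ((chunks4 (PySem.Int.toChars (pyRoundInt n d)).reverse).map List.reverse) 0 hgs
    rw [strip_append_space _ hBs]
    simp only [List.length_eq_zero_iff]

-- ===== VERDICT (by name: the statement is the Claim_ definition above) =====
theorem get_kor_amount_string_spec : Claim_equal_get_kor_amount_string := by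
  intro num_amount ndigits_round str_suffix hdom hpre
  unfold Spec_get_kor_amount_string
  exact assembly num_amount ndigits_round str_suffix hdom hpre
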